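-- pv_equiv track=rewrite | github.com/OliverQian/Iris-Comparator | daugman.py | radius_of_maximal_difference
-- ===== SOURCE A (Python) =====
-- def radius_of_maximal_difference(intensity_sum_list, max_difference):
--     it_to_return = 0
--     for it in range(0, intensity_sum_list.__len__() - 1):
--         temp_diff = intensity_sum_list[it + 1] - intensity_sum_list[it]
--         if temp_diff > max_difference:
--             max_difference = temp_diff
--             it_to_return = it
--     return it_to_return, max_difference
-- ===== SOURCE B (Python) =====
-- def radius_of_maximal_difference(intensity_sum_list, max_difference):
--     diffs = [b - a for a, b in zip(intensity_sum_list, intensity_sum_list[1:])]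
--     if not diffs:
--         return 0, max_difference
--     best = max(diffs)
--     if best > max_difference:
--         return diffs.index(best), best
--     return 0, max_difference
-- ===== Notes on version B (the rewrite author's own statement) =====
-- stated objective: alternative
-- what changed: A's single running-max loop with index bookkeeping is replaced by a compute-then-locate decomposition: build the consecutive-difference list with zip, take max(diffs) once, and recover the first index with list.index only when the max beats the incoming threshold.
import Mathlib
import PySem

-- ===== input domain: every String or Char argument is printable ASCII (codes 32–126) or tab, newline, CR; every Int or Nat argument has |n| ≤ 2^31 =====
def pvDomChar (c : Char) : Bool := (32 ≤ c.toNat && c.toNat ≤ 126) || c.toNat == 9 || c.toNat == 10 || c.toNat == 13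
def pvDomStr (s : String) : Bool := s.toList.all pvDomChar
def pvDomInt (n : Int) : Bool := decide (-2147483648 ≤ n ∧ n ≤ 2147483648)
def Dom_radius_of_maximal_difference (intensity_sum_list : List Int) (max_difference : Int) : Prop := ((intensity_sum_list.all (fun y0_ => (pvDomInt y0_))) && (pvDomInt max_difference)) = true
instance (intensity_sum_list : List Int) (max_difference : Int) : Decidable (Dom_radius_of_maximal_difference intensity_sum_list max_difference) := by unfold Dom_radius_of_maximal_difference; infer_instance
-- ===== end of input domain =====

-- B replaces A's single running-max loop by a compute-the-max-then-locate-its-first-index decomposition over the zip-built difference list (same cost, different structure).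

-- ===== PORT A =====
-- loop over range(0, len-1); both indices it and it+1 are always in range there, so pyGetD with default 0 is exact
def radius_of_maximal_difference (intensity_sum_list : List Int) (max_difference : Int) : Int × Int :=
  (PySem.List.pyRange 0 ((intensity_sum_list.length : Int) - 1) 1).foldl
    (fun st it =>
      let temp_diff := PySem.List.pyGetD intensity_sum_list (it + 1) 0 -
                       PySem.List.pyGetD intensity_sum_list it 0
      if temp_diff > st.2 then (it, temp_diff) else st)
    (0, max_difference)

-- ===== PORT B =====
-- best ∈ diffs whenever .index is reached, so .index never raises and (index? …).getD 0 is exact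
def radius_of_maximal_difference_alt (intensity_sum_list : List Int) (max_difference : Int) : Int × Int :=
  let diffs := (intensity_sum_list.zip (PySem.List.slice intensity_sum_list (some 1) none)).map
    (fun p => p.2 - p.1)
  match PySem.List.max? diffs (fun y => y) with
  | none => (0, max_difference)
  | some best =>
    if best > max_difference then (((PySem.List.index? diffs best).getD 0 : Int), best)
    else (0, max_difference)

-- ===== PRECONDITION & SPEC =====
def Spec_radius_of_maximal_difference (intensity_sum_list : List Int) (max_difference : Int) (out : Int × Int) : Prop := out = radius_of_maximal_difference_alt intensity_sum_list max_difference
instance (intensity_sum_list : List Int) (max_difference : Int) (out : Int × Int) : Decidable (Spec_radius_of_maximal_difference intensity_sum_list max_difference out) := by unfold Spec_radius_of_maximal_difference; infer_instance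

-- ===== CLAIM (what is proved, stated in full; the proofs are below) =====
def Claim_equal_radius_of_maximal_difference : Prop := ∀ (intensity_sum_list : List Int) (max_difference : Int), Dom_radius_of_maximal_difference intensity_sum_list max_difference → Spec_radius_of_maximal_difference intensity_sum_list max_difference (radius_of_maximal_difference intensity_sum_list max_difference)

-- ===== LEMMAS AND PROOFS =====

-- foldl max commutes with a max'ed-in initial element
theorem pv_foldl_max_comm (t : List Int) : ∀ a b : Int, List.foldl max (max a b) t = max a (List.foldl max b t) := by
  induction t with
  | nil => intro a b; simp
  | cons c t ih =>
    intro a b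
    simp only [List.foldl_cons, max_assoc]
    exact ih a (max b c)

-- the enumerate-fold of A's loop body equals B's max-then-first-index computation
theorem pv_enum_fold_char (ds : List Int) : ∀ (i r m : Int),
    (PySem.List.enumerate ds i).foldl
      (fun (st : Int × Int) (p : Int × Int) => if p.2 > st.2 then (p.1, p.2) else st) (r, m) =
    (match PySem.List.max? ds (fun y => y) with
    | none => (r, m)
    | some b => if b > m then (i + ((PySem.List.index? ds b).getD 0 : Int), b) else (r, m)) := by
  induction ds with
  | nil => intro i r m; simp [PySem.List.enumerate_nil, PySem.List.max?]
  | cons d t ih =>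
    intro i r m
    rw [PySem.List.enumerate_cons]
    simp only [List.foldl_cons]
    cases t with
    | nil =>
      by_cases h : d > m <;>
        simp [h, PySem.List.enumerate_nil, PySem.List.max?_id_cons]
    | cons e t' =>
      have hmaxt : PySem.List.max? (e :: t') (fun y => y) = some (List.foldl max e t') :=
        PySem.List.max?_id_cons e t'
      have hmaxdt : PySem.List.max? (d :: e :: t') (fun y => y)
          = some (max d (List.foldl max e t')) := by
        rw [PySem.List.max?_id_cons]
        simp only [List.foldl_cons]
        rw [pv_foldl_max_comm]
      set b' := List.foldl max e t' with hb'
      have hb'mem : b' ∈ e :: t' := PySem.List.max?_mem hmaxt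
      obtain ⟨k, hk⟩ : ∃ k : Nat, PySem.List.index? (e :: t') b' = some k :=
        Option.isSome_iff_exists.mp (((PySem.List.index?_isSome_iff _ _).mpr hb'mem))
      rw [hmaxdt]
      by_cases h : d > m
      · simp only [h, if_true]
        rw [ih (i + 1) i d, hmaxt]
        by_cases hb : b' > d
        · have hne : d ≠ b' := ne_of_lt hb
          have hmax : max d b' = b' := max_eq_right (le_of_lt hb)
          have hidx : PySem.List.index? (d :: e :: t') b' = some (k + 1) := by
            rw [PySem.List.index?_cons_of_ne _ hne, hk]; rfl
          have hbm : b' > m := lt_trans h hb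
          simp only [hb, if_true, hmax, hidx, hbm, hk, Option.getD_some]
          have harith : i + 1 + (k : Int) = i + ((k : Int) + 1) := by ring
          push_cast; rw [harith]
        · have hmax : max d b' = d := max_eq_left (le_of_not_gt hb)
          rw [hmax, PySem.List.index?_cons_self]
          simp [hb, h]
      · simp only [h, if_false]
        rw [ih (i + 1) r m, hmaxt]
        by_cases hb : b' > m
        · have hdm : d ≤ m := le_of_not_gt h
          have hne : d ≠ b' := ne_of_lt (lt_of_le_of_lt hdm hb)
          have hmax : max d b' = b' := max_eq_right (le_of_lt (lt_of_le_of_lt hdm hb))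
          have hidx : PySem.List.index? (d :: e :: t') b' = some (k + 1) := by
            rw [PySem.List.index?_cons_of_ne _ hne, hk]; rfl
          simp only [hb, hmax, hidx, hk, Option.getD_some]
          have harith : i + 1 + (k : Int) = i + ((k : Int) + 1) := by ring
          push_cast; rw [harith]
        · have hmm : ¬ max d b' > m := by
            rw [not_lt]; exact max_le (le_of_not_gt h) (le_of_not_gt hb)
          simp [hb, hmm]

-- pointwise getD bridge: A's index arithmetic reads exactly the difference list
theorem pv_getD_diff (xs : List Int) (j : Int) (h0 : 0 ≤ j)
    (h1 : j < (((xs.zip xs.tail).map (fun p : Int × Int => p.2 - p.1)).length : Int)) :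
    PySem.List.pyGetD xs (j + 1) 0 - PySem.List.pyGetD xs j 0
      = PySem.List.pyGetD ((xs.zip xs.tail).map (fun p : Int × Int => p.2 - p.1)) j 0 := by
  have hlen : ((xs.zip xs.tail).map (fun p : Int × Int => p.2 - p.1)).length
      = xs.length - 1 := by
    simp [List.length_zip]
  have hjlt : j < (xs.length : Int) - 1 := by omega
  have hxs : 1 ≤ xs.length := by omega
  rw [PySem.List.pyGetD_eq_getElem _ _ h0 (by omega),
      PySem.List.pyGetD_eq_getElem _ _ (by omega) (by omega),
      PySem.List.pyGetD_eq_getElem _ _ h0 (by omega)]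
  have htn : (j + 1).toNat = j.toNat + 1 := by omega
  simp only [htn, List.getElem_map, List.getElem_zip, List.getElem_tail]

-- A's range fold equals the enumerate fold over the difference list
theorem pv_A_eq_enum (xs : List Int) (md : Int) :
    radius_of_maximal_difference xs md =
      (PySem.List.enumerate ((xs.zip xs.tail).map (fun p : Int × Int => p.2 - p.1)) 0).foldl
        (fun (st : Int × Int) (p : Int × Int) => if p.2 > st.2 then (p.1, p.2) else st) (0, md) := by
  unfold radius_of_maximal_difference
  cases xs with
  | nil =>
    rw [PySem.List.pyRange_one_eq_nil (by norm_num)]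
    simp [PySem.List.enumerate_nil]
  | cons x xs' =>
    have hlen : (((x :: xs').length : Int)) - 1
        = ((((x :: xs').zip (x :: xs').tail).map (fun p : Int × Int => p.2 - p.1)).length : Int) := by
      simp [List.length_zip]
    rw [hlen, PySem.List.enumerate_eq_map_pyRange _ 0, List.foldl_map]
    simp only [PySem.List.len_eq]
    apply PySem.List.foldl_congr_mem
    intro acc j hj
    rw [PySem.List.mem_pyRange_one] at hj
    simp only [pv_getD_diff (x :: xs') j hj.1 hj.2]

-- ===== VERDICT (by name: the statement is the Claim_ definition above) =====
theorem radius_of_maximal_difference_spec : Claim_equal_radius_of_maximal_difference := by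
  intro xs md _
  unfold Spec_radius_of_maximal_difference radius_of_maximal_difference_alt
  rw [pv_A_eq_enum, pv_enum_fold_char]
  simp only [PySem.List.slice_from_one, zero_add]
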